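-- pv_equiv track=rewrite | github.com/HarouneKESSAL/tajweed-modular-assessment | scripts/content/build_chunked_content_manifest.py | iter_word_ranges
-- ===== SOURCE A (Python) =====
-- def iter_word_ranges(text: str):
--     start = None
--     for idx, ch in enumerate(text):
--         if ch.isspace():
--             if start is not None:
--                 yield start, idx
--                 start = None
--         else:
--             if start is None:
--                 start = idx
--     if start is not None:
--         yield start, len(text)
-- ===== SOURCE B (Python) =====
-- from itertools import groupby
--
-- def iter_word_ranges(text: str):
--     offset = 0
--     for is_space, group in groupby(text, key=str.isspace):
--         n = sum(1 for _ in group)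
--         if not is_space:
--             yield offset, offset + n
--         offset += n
-- ===== Notes on version B (the rewrite author's own statement) =====
-- stated objective: idiomatic
-- what changed: Replaces the explicit start/None sentinel state machine with itertools.groupby partitioning the text into runs of same space-ness, yielding a range per non-space run while a running offset tracks positions.
import Mathlib
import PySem

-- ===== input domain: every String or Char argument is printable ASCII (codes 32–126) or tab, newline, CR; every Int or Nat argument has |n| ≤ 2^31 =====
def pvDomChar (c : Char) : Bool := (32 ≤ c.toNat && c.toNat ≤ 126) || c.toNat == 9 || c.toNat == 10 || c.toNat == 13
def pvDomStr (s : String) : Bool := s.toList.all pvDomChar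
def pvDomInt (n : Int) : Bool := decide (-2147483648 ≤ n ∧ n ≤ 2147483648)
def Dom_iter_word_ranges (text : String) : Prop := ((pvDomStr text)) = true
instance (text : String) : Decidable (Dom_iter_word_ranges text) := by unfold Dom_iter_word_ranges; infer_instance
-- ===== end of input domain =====

-- B replaces A's start/None sentinel state machine with a groupby-style partition of the
-- text into runs of same space-ness (objective: idiomatic; same cost).

-- ===== PORT A =====
-- the 'for idx, ch in enumerate(text)' loop with state 'start'; yields are conses, the
-- trailing 'if start is not None: yield start, len(text)' is the base case.
def iterWordRangesLoopA (len : Int) : Option Int → List (Int × Char) → List (Int × Int)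
  | start, [] =>
      match start with
      | some s => [(s, len)]
      | none => []
  | start, (idx, ch) :: rest =>
      if PySem.Chars.isspace ch then
        match start with
        | some s => (s, idx) :: iterWordRangesLoopA len none rest
        | none => iterWordRangesLoopA len none rest
      else
        match start with
        | none => iterWordRangesLoopA len (some idx) rest
        | some s => iterWordRangesLoopA len (some s) rest

def iter_word_ranges (text : String) : List (Int × Int) :=
  iterWordRangesLoopA (PySem.Str.len text) none (PySem.List.enumerate text.toList 0)

-- ===== PORT B =====
-- groupby(text, key=str.isspace) as a run-length encoding (key, run length) …
def iterWordRangesRunsAux : Bool → Nat → List Char → List (Bool × Nat)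
  | k, n, [] => [(k, n)]
  | k, n, c :: rest =>
      if PySem.Chars.isspace c = k then iterWordRangesRunsAux k (n + 1) rest
      else (k, n) :: iterWordRangesRunsAux (PySem.Chars.isspace c) 1 rest

def iterWordRangesRuns : List Char → List (Bool × Nat)
  | [] => []
  | c :: rest => iterWordRangesRunsAux (PySem.Chars.isspace c) 1 rest

-- … then the 'for is_space, group in groupby' loop with the running offset.
def iterWordRangesLoopB : Nat → List (Bool × Nat) → List (Int × Int)
  | _, [] => []
  | off, (isSpace, n) :: rest =>
      if isSpace then iterWordRangesLoopB (off + n) rest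
      else ((off : Int), ((off + n : Nat) : Int)) :: iterWordRangesLoopB (off + n) rest

def iter_word_ranges_alt (text : String) : List (Int × Int) :=
  iterWordRangesLoopB 0 (iterWordRangesRuns text.toList)

-- ===== PRECONDITION & SPEC =====
def Spec_iter_word_ranges (text : String) (out : List (Int × Int)) : Prop := out = iter_word_ranges_alt text
instance (text : String) (out : List (Int × Int)) : Decidable (Spec_iter_word_ranges text out) := by unfold Spec_iter_word_ranges; infer_instance

-- ===== CLAIM (what is proved, stated in full; the proofs are below) =====
def Claim_equal_iter_word_ranges : Prop := ∀ (text : String), Dom_iter_word_ranges text → Spec_iter_word_ranges text (iter_word_ranges text)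

-- ===== LEMMAS AND PROOFS =====

-- Loop invariant, both loop states at once. First conjunct: inside a non-space run that
-- started at index s and has n chars so far (A: start = some s, next index s+n;
-- B: counting the current run, offset s). Second: inside a space run that started at
-- index off and has m chars so far (A: start = none, next index off+m; B: offset off).
theorem iterWordRanges_inv (len : Int) (l : List Char) :
    (∀ (s n : Nat), 0 < n → (s : Int) + n + l.length = len →
        iterWordRangesLoopA len (some (s : Int)) (PySem.List.enumerate l ((s + n : Nat) : Int)) =
          iterWordRangesLoopB s (iterWordRangesRunsAux false n l))
    ∧
    (∀ (off m : Nat), 0 < m → (off : Int) + m + l.length = len →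
        iterWordRangesLoopA len none (PySem.List.enumerate l ((off + m : Nat) : Int)) =
          iterWordRangesLoopB off (iterWordRangesRunsAux true m l)) := by
  induction l with
  | nil =>
      refine ⟨?_, ?_⟩
      · intro s n hn hl
        simp only [List.length_nil, Int.natCast_zero, add_zero] at hl
        simp [PySem.List.enumerate, iterWordRangesLoopA, iterWordRangesRunsAux,
          iterWordRangesLoopB]
        omega
      · intro off m hm hl
        simp [PySem.List.enumerate, iterWordRangesLoopA, iterWordRangesRunsAux,
          iterWordRangesLoopB]
  | cons c rest ih =>
      obtain ⟨ih1, ih2⟩ := ih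
      refine ⟨?_, ?_⟩
      · intro s n hn hl
        rw [PySem.List.enumerate_cons]
        by_cases hsp : PySem.Chars.isspace c = true
        · -- non-space run ends here: A yields (s, s+n); B emits the (false, n) run
          simp [iterWordRangesLoopA, hsp, iterWordRangesRunsAux, iterWordRangesLoopB]
          have := ih2 (s + n) 1 (by omega) (by simp only [List.length_cons] at hl; push_cast at hl ⊢; omega)
          simpa using this
        · -- run continues
          replace hsp : PySem.Chars.isspace c = false := by
            cases h : PySem.Chars.isspace c <;> simp_all
          simp only [iterWordRangesLoopA, Bool.false_eq_true, if_false,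
            iterWordRangesRunsAux, hsp]
          have := ih1 s (n + 1) (by omega) (by simp only [List.length_cons] at hl; push_cast at hl ⊢; omega)
          have harg : ((s + n : Nat) : Int) + 1 = ((s + (n + 1) : Nat) : Int) := by
            push_cast; ring
          rw [harg]
          exact this
      · intro off m hm hl
        rw [PySem.List.enumerate_cons]
        by_cases hsp : PySem.Chars.isspace c = true
        · -- space run continues
          simp only [iterWordRangesLoopA, if_true, iterWordRangesRunsAux, hsp]
          have := ih2 off (m + 1) (by omega) (by simp only [List.length_cons] at hl; push_cast at hl ⊢; omega)
          have harg : ((off + m : Nat) : Int) + 1 = ((off + (m + 1) : Nat) : Int) := by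
            push_cast; ring
          rw [harg]
          exact this
        · -- space run ends, a new word starts at index off+m
          replace hsp : PySem.Chars.isspace c = false := by
            cases h : PySem.Chars.isspace c <;> simp_all
          simp [iterWordRangesLoopA, hsp, iterWordRangesRunsAux, iterWordRangesLoopB]
          have := ih1 (off + m) 1 (by omega) (by simp only [List.length_cons] at hl; push_cast at hl ⊢; omega)
          have harg : (((off + m) + 1 : Nat) : Int) = ((off + m : Nat) : Int) + 1 := by
            push_cast; ring
          rw [harg] at this
          simpa using this

-- ===== VERDICT (by name: the statement is the Claim_ definition above) =====
theorem iter_word_ranges_spec : Claim_equal_iter_word_ranges := by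
  intro text _
  unfold Spec_iter_word_ranges iter_word_ranges iter_word_ranges_alt
  cases hl : text.toList with
  | nil => simp [PySem.List.enumerate, iterWordRangesLoopA, iterWordRangesRuns,
      iterWordRangesLoopB, hl]
  | cons c rest =>
      have hlen : PySem.Str.len text = (1 : Int) + rest.length := by
        simp [PySem.Str.len, hl]; omega
      rw [PySem.List.enumerate_cons, iterWordRangesRuns]
      by_cases hsp : PySem.Chars.isspace c = true
      · simp only [iterWordRangesLoopA, hsp, if_true]
        have := (iterWordRanges_inv (PySem.Str.len text) rest).2 0 1 (by omega)
          (by rw [hlen]; push_cast; ring)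
        simpa using this
      · replace hsp : PySem.Chars.isspace c = false := by
          cases h : PySem.Chars.isspace c <;> simp_all
        simp only [iterWordRangesLoopA, hsp, Bool.false_eq_true, if_false]
        have := (iterWordRanges_inv (PySem.Str.len text) rest).1 0 1 (by omega)
          (by rw [hlen]; push_cast; ring)
        simpa [hsp] using this
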